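-- pv_equiv track=rewrite | github.com/rashingar/Product-Agent | scraper/pipeline/taxonomy.py | _tokens_soft_overlap
-- ===== SOURCE A (Python) =====
-- def _common_prefix_length(left: str, right: str) -> int:
--     limit = min(len(left), len(right))
--     idx = 0
--     while idx < limit and left[idx] == right[idx]:
--         idx += 1
--     return idx
--
-- def _tokens_soft_overlap(left_tokens: set[str], right_tokens: set[str], min_prefix: int = 6) -> int:
--     if not left_tokens or not right_tokens:
--         return 0
--     matches = 0
--     for left in left_tokens:
--         if any(
--             left == right
--             or left.startswith(right)
--             or right.startswith(left)
--             or _common_prefix_length(left, right) >= min_prefix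
--             for right in right_tokens
--         ):
--             matches += 1
--     return matches
-- ===== SOURCE B (Python) =====
-- def _tokens_soft_overlap(left_tokens, right_tokens, min_prefix=6):
--     # Prefix-index re-implementation: build hash sets of right tokens, their
--     # k-character heads, and their short (< k) prefixes once, then answer each
--     # left token by O(k) set lookups instead of scanning every right token.
--     if not left_tokens or not right_tokens:
--         return 0
--     k = max(min_prefix, 0)
--     heads = {r[:k] for r in right_tokens}
--     rights = set(right_tokens)
--     short_prefixes = (
--         {r[:j] for r in right_tokens for j in range(min(len(r), k - 1) + 1)}
--         if k > 0 else set()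
--     )
--     matches = 0
--     for l in left_tokens:
--         if l[:k] in heads:
--             matches += 1
--         elif k > 0 and (
--             (len(l) < k and l in short_prefixes)
--             or any(l[:j] in rights for j in range(min(len(l), k - 1) + 1))
--         ):
--             matches += 1
--     return matches
-- ===== Notes on version B (the rewrite author's own statement) =====
-- stated objective: faster
-- what changed: Replaces the nested scan over every (left,right) pair with three hash sets built once from the right tokens (the tokens themselves, their min_prefix-character heads, and their shorter prefixes), so each left token is decided by O(min_prefix) set lookups instead of comparing it against every right token.
import Mathlib
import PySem

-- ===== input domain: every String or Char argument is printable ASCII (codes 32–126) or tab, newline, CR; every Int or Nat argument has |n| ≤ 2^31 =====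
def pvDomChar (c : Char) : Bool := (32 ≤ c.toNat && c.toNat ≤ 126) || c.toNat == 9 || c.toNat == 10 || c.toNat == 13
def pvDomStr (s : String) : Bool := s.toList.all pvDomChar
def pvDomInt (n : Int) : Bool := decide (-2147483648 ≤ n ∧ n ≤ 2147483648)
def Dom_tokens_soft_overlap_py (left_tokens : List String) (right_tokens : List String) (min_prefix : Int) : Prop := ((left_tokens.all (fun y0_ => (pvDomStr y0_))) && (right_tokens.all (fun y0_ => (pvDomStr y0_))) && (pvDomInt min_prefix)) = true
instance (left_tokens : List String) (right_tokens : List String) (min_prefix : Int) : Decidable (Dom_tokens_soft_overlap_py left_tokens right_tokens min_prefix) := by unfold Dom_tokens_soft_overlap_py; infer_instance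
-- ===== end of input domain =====

-- B replaces A's scan of every (left, right) pair by hash sets of the right tokens,
-- their min_prefix-character heads and their shorter prefixes, built once (objective: faster).

-- ===== PORT A =====
-- port of _common_prefix_length: the while loop walks both strings from index 0
-- and counts positions while the characters agree (one recursion step = one iteration)
def pvCPL : List Char → List Char → Int
  | a :: as, b :: bs => if a == b then 1 + pvCPL as bs else 0
  | _, _ => 0

def tokens_soft_overlap_py (left_tokens : List String) (right_tokens : List String) (min_prefix : Int) : Int :=
  if left_tokens.isEmpty || right_tokens.isEmpty then 0
  else
    left_tokens.foldl (fun acc left =>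
      if right_tokens.any (fun right =>
          left == right || PySem.Str.startswith left right || PySem.Str.startswith right left
            || decide (min_prefix ≤ pvCPL left.toList right.toList))
      then acc + 1 else acc) 0

-- ===== PORT B =====
def tokens_soft_overlap_py_alt (left_tokens : List String) (right_tokens : List String) (min_prefix : Int) : Int :=
  if left_tokens.isEmpty || right_tokens.isEmpty then 0
  else
    let k : Int := max min_prefix 0
    let heads : PySem.Set String :=
      PySem.Set.ofList (right_tokens.map (fun r => PySem.Str.slice r none (some k)))
    let rights : PySem.Set String := PySem.Set.ofList right_tokens
    let shorts : PySem.Set String :=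
      if 0 < k then
        PySem.Set.ofList (right_tokens.flatMap (fun r =>
          (PySem.List.pyRange 0 (min (PySem.Str.len r) (k - 1) + 1)).map
            (fun j => PySem.Str.slice r none (some j))))
      else PySem.Set.empty
    left_tokens.foldl (fun acc l =>
      if heads.contains (PySem.Str.slice l none (some k)) then acc + 1
      else if decide (0 < k) &&
          ((decide (PySem.Str.len l < k) && shorts.contains l)
            || (PySem.List.pyRange 0 (min (PySem.Str.len l) (k - 1) + 1)).any
                 (fun j => rights.contains (PySem.Str.slice l none (some j))))
      then acc + 1 else acc) 0

-- ===== PRECONDITION & SPEC =====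
def Spec_tokens_soft_overlap_py (left_tokens : List String) (right_tokens : List String) (min_prefix : Int) (out : Int) : Prop := out = tokens_soft_overlap_py_alt left_tokens right_tokens min_prefix
instance (left_tokens : List String) (right_tokens : List String) (min_prefix : Int) (out : Int) : Decidable (Spec_tokens_soft_overlap_py left_tokens right_tokens min_prefix out) := by unfold Spec_tokens_soft_overlap_py; infer_instance

-- ===== CLAIM (what is proved, stated in full; the proofs are below) =====
def Claim_equal_tokens_soft_overlap_py : Prop := ∀ (left_tokens : List String) (right_tokens : List String) (min_prefix : Int), Dom_tokens_soft_overlap_py left_tokens right_tokens min_prefix → Spec_tokens_soft_overlap_py left_tokens right_tokens min_prefix (tokens_soft_overlap_py left_tokens right_tokens min_prefix)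

-- ===== LEMMAS AND PROOFS =====

-- Nat-valued common-prefix length, used to reason about pvCPL
def pvNatCPL : List Char → List Char → Nat
  | a :: as, b :: bs => if a == b then pvNatCPL as bs + 1 else 0
  | _, _ => 0

lemma pvCPL_eq (l r : List Char) : pvCPL l r = (pvNatCPL l r : Int) := by
  induction l generalizing r with
  | nil => cases r <;> simp [pvCPL, pvNatCPL]
  | cons a as ih =>
    cases r with
    | nil => simp [pvCPL, pvNatCPL]
    | cons b bs =>
      by_cases h : a = b
      · simp [pvCPL, pvNatCPL, h, ih]
        omega
      · simp [pvCPL, pvNatCPL, h]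

lemma pvNatCPL_comm (l r : List Char) : pvNatCPL l r = pvNatCPL r l := by
  induction l generalizing r with
  | nil => cases r <;> simp [pvNatCPL]
  | cons a as ih =>
    cases r with
    | nil => simp [pvNatCPL]
    | cons b bs =>
      by_cases h : a = b
      · simp [pvNatCPL, h, ih]
      · simp [pvNatCPL, h, Ne.symm h]

lemma pvNatCPL_le_left (l r : List Char) : pvNatCPL l r ≤ l.length := by
  induction l generalizing r with
  | nil => cases r <;> simp [pvNatCPL]
  | cons a as ih =>
    cases r with
    | nil => simp [pvNatCPL]
    | cons b bs =>
      by_cases h : a = b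
      · have := ih bs
        simp [pvNatCPL, h]
        omega
      · simp [pvNatCPL, h]

lemma pvNatCPL_le_right (l r : List Char) : pvNatCPL l r ≤ r.length := by
  rw [pvNatCPL_comm]; exact pvNatCPL_le_left r l

lemma pvNatCPL_prefix_iff (l r : List Char) : l <+: r ↔ pvNatCPL l r = l.length := by
  induction l generalizing r with
  | nil => simp [pvNatCPL]
  | cons a as ih =>
    cases r with
    | nil => simp [pvNatCPL]
    | cons b bs =>
      by_cases h : a = b
      · simp [pvNatCPL, h, List.cons_prefix_cons, ih]
      · simp [pvNatCPL, h, List.cons_prefix_cons]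

lemma pvNatCPL_take_iff (l r : List Char) (n : Nat) :
    l.take n = r.take n ↔ (min n l.length ≤ pvNatCPL l r ∧ min n l.length = min n r.length) := by
  induction l generalizing r n with
  | nil =>
    cases r <;> cases n <;> simp [pvNatCPL]
  | cons a as ih =>
    cases n with
    | zero => simp
    | succ n =>
      cases r with
      | nil => simp [pvNatCPL]
      | cons b bs =>
        by_cases h : a = b
        · simp [pvNatCPL, h, ih bs n]
        · simp [pvNatCPL, h]

-- the heart of the equivalence: A's pairwise match condition is B's pairwise condition
lemma pvPair_iff (l r : List Char) (k : Int) :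
    (l = r ∨ r <+: l ∨ l <+: r ∨ k ≤ (pvNatCPL l r : Int)) ↔
    (l.take (max k 0).toNat = r.take (max k 0).toNat
     ∨ (0 < max k 0 ∧ l.length < (max k 0).toNat ∧
        ∃ j : Nat, j ≤ min r.length ((max k 0).toNat - 1) ∧ l = r.take j)
     ∨ (0 < max k 0 ∧
        ∃ j : Nat, j ≤ min l.length ((max k 0).toNat - 1) ∧ l.take j = r)) := by
  have hcl := pvNatCPL_le_left l r
  have hcr := pvNatCPL_le_right l r
  constructor
  · rintro (rfl | hp | hp | hk)
    · left; rfl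
    · -- r is a prefix of l
      have hcr' : pvNatCPL l r = r.length := by
        rw [pvNatCPL_comm]; exact (pvNatCPL_prefix_iff r l).mp hp
      have hrl : r.length ≤ l.length := hp.length_le
      by_cases h : (max k 0).toNat ≤ r.length
      · left; rw [pvNatCPL_take_iff]; omega
      · right; right
        exact ⟨by omega, r.length, by omega, (List.prefix_iff_eq_take.mp hp).symm⟩
    · -- l is a prefix of r
      have hcl' : pvNatCPL l r = l.length := (pvNatCPL_prefix_iff l r).mp hp
      have hlr : l.length ≤ r.length := hp.length_le
      by_cases h : (max k 0).toNat ≤ l.length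
      · left; rw [pvNatCPL_take_iff]; omega
      · right; left
        exact ⟨by omega, by omega, l.length, by omega, List.prefix_iff_eq_take.mp hp⟩
    · left; rw [pvNatCPL_take_iff]; omega
  · rintro (h1 | ⟨hk, hlen, j, hj, hje⟩ | ⟨hk, j, hj, hje⟩)
    · rw [pvNatCPL_take_iff] at h1
      by_cases h : l.length < (max k 0).toNat
      · right; right; left
        rw [pvNatCPL_prefix_iff]; omega
      · right; right; right; omega
    · right; right; left
      rw [hje]; exact List.take_prefix j r
    · right; left
      rw [← hje]; exact List.take_prefix j l

lemma pvSlice_toList (s : String) (j : Int) (hj : 0 ≤ j) :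
    (PySem.Str.slice s none (some j)).toList = s.toList.take j.toNat := by
  rw [PySem.Str.toList_slice, PySem.Chars.slice_eq_listSlice,
    show (some j : Option Int) = some ((j.toNat : Nat) : Int) by rw [Int.toNat_of_nonneg hj],
    PySem.List.slice_to_natCast]

-- A's pairwise condition, rephrased as B's pairwise condition (string level)
lemma pvPairStr_iff (l r : String) (k : Int) :
    (l == r || PySem.Str.startswith l r || PySem.Str.startswith r l
      || decide (k ≤ pvCPL l.toList r.toList)) = true ↔
    (PySem.Str.slice l none (some (max k 0)) = PySem.Str.slice r none (some (max k 0))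
     ∨ (0 < max k 0 ∧ PySem.Str.len l < max k 0 ∧
        ∃ j : Int, 0 ≤ j ∧ j < min (PySem.Str.len r) (max k 0 - 1) + 1
          ∧ l = PySem.Str.slice r none (some j))
     ∨ (0 < max k 0 ∧
        ∃ j : Int, 0 ≤ j ∧ j < min (PySem.Str.len l) (max k 0 - 1) + 1
          ∧ PySem.Str.slice l none (some j) = r)) := by
  have hmax : (0 : Int) ≤ max k 0 := le_max_right k 0
  have hpair := pvPair_iff l.toList r.toList k
  simp only [Bool.or_eq_true, beq_iff_eq, PySem.Str.startswith_eq,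
    PySem.Chars.startswith_iff, decide_eq_true_eq, pvCPL_eq]
  constructor
  · intro h
    have h' : l.toList = r.toList ∨ r.toList <+: l.toList ∨ l.toList <+: r.toList ∨
        k ≤ (pvNatCPL l.toList r.toList : Int) := by
      rcases h with ((h | h) | h) | h
      · exact Or.inl (by rw [h])
      · exact Or.inr (Or.inl h)
      · exact Or.inr (Or.inr (Or.inl h))
      · exact Or.inr (Or.inr (Or.inr h))
    rcases hpair.mp h' with h1 | ⟨hk, hlen, j, hj, hje⟩ | ⟨hk, j, hj, hje⟩
    · left
      rw [← String.toList_inj, pvSlice_toList _ _ hmax, pvSlice_toList _ _ hmax]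
      exact h1
    · right; left
      refine ⟨by omega, by rw [PySem.Str.len_eq]; omega, (j : Int), by omega,
        by rw [PySem.Str.len_eq]; omega, ?_⟩
      rw [← String.toList_inj, pvSlice_toList _ _ (by omega)]
      simpa using hje
    · right; right
      refine ⟨by omega, (j : Int), by omega, by rw [PySem.Str.len_eq]; omega, ?_⟩
      rw [← String.toList_inj, pvSlice_toList _ _ (by omega)]
      simpa using hje
  · intro h
    have h' : l.toList = r.toList ∨ r.toList <+: l.toList ∨ l.toList <+: r.toList ∨
        k ≤ (pvNatCPL l.toList r.toList : Int) := by
      apply hpair.mpr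
      rcases h with h1 | ⟨hk, hlen, j, hj0, hjlt, hje⟩ | ⟨hk, j, hj0, hjlt, hje⟩
      · left
        rw [← String.toList_inj, pvSlice_toList _ _ hmax, pvSlice_toList _ _ hmax] at h1
        exact h1
      · rw [PySem.Str.len_eq] at hlen hjlt
        right; left
        refine ⟨by omega, by omega, j.toNat, by omega, ?_⟩
        rw [← String.toList_inj, pvSlice_toList _ _ hj0] at hje
        exact hje
      · rw [PySem.Str.len_eq] at hjlt
        right; right
        refine ⟨by omega, j.toNat, by omega, ?_⟩
        rw [← String.toList_inj, pvSlice_toList _ _ hj0] at hje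
        exact hje
    rcases h' with h | h | h | h
    · exact Or.inl (Or.inl (Or.inl (String.toList_inj.mp h)))
    · exact Or.inl (Or.inl (Or.inr h))
    · exact Or.inl (Or.inr h)
    · exact Or.inr h

-- A's inner any over right tokens equals B's indexed test for every left token
lemma pvStep_iff (right_tokens : List String) (k : Int) (l : String) :
    (right_tokens.any (fun right =>
        l == right || PySem.Str.startswith l right || PySem.Str.startswith right l
          || decide (k ≤ pvCPL l.toList right.toList))) =
    ((PySem.Set.ofList (right_tokens.map
          (fun r => PySem.Str.slice r none (some (max k 0))))).contains
        (PySem.Str.slice l none (some (max k 0)))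
     || (decide (0 < max k 0) &&
        ((decide (PySem.Str.len l < max k 0) &&
            (if 0 < max k 0 then
              PySem.Set.ofList (right_tokens.flatMap (fun r =>
                (PySem.List.pyRange 0 (min (PySem.Str.len r) (max k 0 - 1) + 1)).map
                  (fun j => PySem.Str.slice r none (some j))))
             else PySem.Set.empty).contains l)
          || (PySem.List.pyRange 0 (min (PySem.Str.len l) (max k 0 - 1) + 1)).any
               (fun j => (PySem.Set.ofList right_tokens).contains
                 (PySem.Str.slice l none (some j)))))) := by
  rw [Bool.eq_iff_iff]
  by_cases hk : 0 < max k 0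
  · rw [if_pos hk]
    simp only [List.any_eq_true, pvPairStr_iff]
    simp only [PySem.Set.contains_iff, PySem.Set.mem_ofList, List.mem_map,
      List.mem_flatMap, Bool.or_eq_true, Bool.and_eq_true, decide_eq_true_eq,
      PySem.List.mem_pyRange_one, List.any_eq_true]
    constructor
    · rintro ⟨r, hr, h1 | ⟨_, hlen, j, hj⟩ | ⟨_, j, hj⟩⟩
      · exact Or.inl ⟨r, hr, h1.symm⟩
      · exact Or.inr ⟨hk, Or.inl ⟨hlen, r, hr, ⟨j, ⟨hj.1, hj.2.1⟩, hj.2.2.symm⟩⟩⟩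
      · exact Or.inr ⟨hk, Or.inr ⟨j, ⟨hj.1, hj.2.1⟩, by rw [hj.2.2]; exact hr⟩⟩
    · rintro (⟨r, hr, h1⟩ | ⟨_, ⟨hlen, r, hr, j, hj, hje⟩ | ⟨j, hj, hmem⟩⟩)
      · exact ⟨r, hr, Or.inl h1.symm⟩
      · exact ⟨r, hr, Or.inr (Or.inl ⟨hk, hlen, j, hj.1, hj.2, hje.symm⟩)⟩
      · exact ⟨PySem.Str.slice l none (some j), hmem, Or.inr (Or.inr ⟨hk, j, hj.1, hj.2, rfl⟩)⟩
  · have hk0 : max k 0 = 0 := by omega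
    have hd : decide (0 < max k 0) = false := by simp [hk]
    rw [hd]
    have hslice : ∀ s t : String,
        PySem.Str.slice s none (some (max k 0)) = PySem.Str.slice t none (some (max k 0)) := by
      intro s t
      rw [← String.toList_inj, pvSlice_toList _ _ (le_max_right k 0),
        pvSlice_toList _ _ (le_max_right k 0), hk0]
      simp
    simp only [List.any_eq_true, pvPairStr_iff]
    simp only [Bool.false_and, Bool.or_false, PySem.Set.contains_iff,
      PySem.Set.mem_ofList, List.mem_map]
    constructor
    · rintro ⟨r, hr, _⟩
      exact ⟨r, hr, hslice r l⟩
    · rintro ⟨r, hr, _⟩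
      exact ⟨r, hr, Or.inl (hslice l r)⟩

-- ===== VERDICT (by name: the statement is the Claim_ definition above) =====
theorem tokens_soft_overlap_py_spec : Claim_equal_tokens_soft_overlap_py := by
  intro left_tokens right_tokens min_prefix _
  unfold Spec_tokens_soft_overlap_py tokens_soft_overlap_py tokens_soft_overlap_py_alt
  by_cases h : (left_tokens.isEmpty || right_tokens.isEmpty) = true
  · simp only [h, if_pos]
  · simp only [h, Bool.false_eq_true, if_false]
    apply List.foldl_ext
    intro m l _
    rw [pvStep_iff right_tokens min_prefix l]
    cases h1 : ((PySem.Set.ofList (right_tokens.map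
        (fun r => PySem.Str.slice r none (some (max min_prefix 0))))).contains
        (PySem.Str.slice l none (some (max min_prefix 0)))) <;>
      cases h2 : (decide (0 < max min_prefix 0) &&
        ((decide (PySem.Str.len l < max min_prefix 0) &&
            (if 0 < max min_prefix 0 then
              PySem.Set.ofList (right_tokens.flatMap (fun r =>
                (PySem.List.pyRange 0 (min (PySem.Str.len r) (max min_prefix 0 - 1) + 1)).map
                  (fun j => PySem.Str.slice r none (some j))))
             else PySem.Set.empty).contains l)
          || (PySem.List.pyRange 0 (min (PySem.Str.len l) (max min_prefix 0 - 1) + 1)).any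
               (fun j => (PySem.Set.ofList right_tokens).contains
                 (PySem.Str.slice l none (some j))))) <;>
      simp
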